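-- pv_equiv track=rewrite | github.com/selassje/codility | olx_group_challenge/solution.py | solution
-- ===== SOURCE A (Python) =====
-- def solution(juice, capacity):
--     n = len(juice)
--     glasses = [(juice[i], capacity[i]) for i in range(0, n)]
--     sorted_glasses = sorted(glasses)
--     partial_sums = [0 for i in range(0, n)]
--     partial_sums[0] = sorted_glasses[0][0]
--     for i in range(1, n ):
--         partial_sums[i] = partial_sums[i - 1] + sorted_glasses[i][0]
--
--     def find_in_partial_sum(s, e, target) :
--         assert(e >= s)
--         if partial_sums[s] > target:
--             return s
--         if partial_sums[e] <= target:
--             return e + 1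
--         while e - s != 1:
--             mid_index = s + int((e - s) / 2)
--             if partial_sums[mid_index] <= target:
--                 s = mid_index
--             else:
--                 e = mid_index
--         assert(partial_sums[s] <= target and partial_sums[e] > target)
--         return s + 1
--
--
--     def solve_for_juice(j):
--         capacity = sorted_glasses[j][1]
--         space = capacity - sorted_glasses[j][0]
--         if partial_sums[j] <= capacity:
--             return find_in_partial_sum(j, n - 1, capacity)
--         else:
--             return find_in_partial_sum(0, j - 1 , space) + 1
--
--     max_flavours = 1
--     for j in range(0, n) :
--         max_flavours = max(max_flavours, solve_for_juice(j))
--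
--     return max_flavours
-- ===== SOURCE B (Python) =====
-- def solution(juice, capacity):
--     # Simpler: sort once, build prefix sums with a running total, and use a
--     # plain linear scan over the prefix sums instead of a hand-rolled binary
--     # search (correct because after the first prefix sum exceeding the target
--     # all later ones do too, the juice amounts being sorted).
--     glasses = sorted(zip(juice, capacity))
--     n = len(glasses)
--     ps = []
--     t = 0
--     for a, _ in glasses:
--         t += a
--         ps.append(t)
--
--     def first_exceed(s, e, target):
--         # smallest i in [s, e] with ps[i] > target, or e + 1 if none
--         i = s
--         while i <= e and ps[i] <= target:
--             i += 1
--         return i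
--
--     best = 1
--     for j in range(n):
--         a, c = glasses[j]
--         if ps[j] <= c:
--             best = max(best, first_exceed(j, n - 1, c))
--         else:
--             best = max(best, first_exceed(0, j - 1, c - a) + 1)
--     return best
-- ===== Notes on version B (the rewrite author's own statement) =====
-- stated objective: simpler
-- what changed: B keeps the sort but builds the prefix sums with a running total over zip(juice, capacity) and replaces A's hand-rolled per-glass binary search (with its two endpoint special cases) by one plain linear scan returning the first prefix sum exceeding the target, which coincides with the binary search's answer because the sorted juice amounts make every prefix sum after the first crossing stay above the target.
import Mathlib
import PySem

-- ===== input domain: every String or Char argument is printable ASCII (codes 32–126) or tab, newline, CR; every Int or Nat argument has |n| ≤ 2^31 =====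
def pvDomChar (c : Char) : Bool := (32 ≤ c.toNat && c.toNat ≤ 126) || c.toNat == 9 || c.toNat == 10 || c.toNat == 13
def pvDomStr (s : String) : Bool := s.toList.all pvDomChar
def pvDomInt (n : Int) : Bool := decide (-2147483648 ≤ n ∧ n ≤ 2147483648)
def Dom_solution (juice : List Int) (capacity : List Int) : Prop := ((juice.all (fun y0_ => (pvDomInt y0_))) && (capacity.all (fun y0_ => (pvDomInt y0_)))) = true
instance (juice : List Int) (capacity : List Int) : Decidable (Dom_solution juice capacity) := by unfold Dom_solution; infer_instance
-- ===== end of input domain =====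

-- B replaces A's hand-rolled binary search over the prefix sums by a plain linear scan
-- with the same result (sorting makes every prefix sum after the first one exceeding the
-- target also exceed it); objective: simpler.

-- ===== PORT A =====
-- the while-loop of find_in_partial_sum
def pvFindLoop (ps : List Int) (t : Int) (s e : Nat) : Nat :=
  if e - s = 1 then s + 1
  else if _h : s + 1 < e then
    let mid := s + (e - s) / 2
    if ps.getD mid 0 ≤ t then pvFindLoop ps t mid e else pvFindLoop ps t s mid
  else s + 1  -- unreachable on admitted inputs (the loop keeps s < e)
termination_by e - s
decreasing_by all_goals simp_wf; omega

-- find_in_partial_sum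
def pvFind (ps : List Int) (s e : Nat) (t : Int) : Nat :=
  if ps.getD s 0 > t then s
  else if ps.getD e 0 ≤ t then e + 1
  else pvFindLoop ps t s e

-- solve_for_juice
def pvSolve (sg : List (Int × Int)) (ps : List Int) (n j : Nat) : Nat :=
  let cap := (sg.getD j (0, 0)).2
  let space := cap - (sg.getD j (0, 0)).1
  if ps.getD j 0 ≤ cap then pvFind ps j (n - 1) cap
  else pvFind ps 0 (j - 1) space + 1

def solution (juice : List Int) (capacity : List Int) : Int :=
  let n := juice.length
  let glasses := (List.range n).map (fun i => (juice.getD i 0, capacity.getD i 0))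
  let sg := PySem.List.sorted2 glasses Prod.fst Prod.snd
  let ps0 := (List.replicate n (0 : Int)).set 0 ((sg.getD 0 (0, 0)).1)
  let ps := (List.range (n - 1)).foldl
    (fun l k => l.set (k + 1) (l.getD k 0 + (sg.getD (k + 1) (0, 0)).1)) ps0
  ((List.range n).foldl (fun m j => max m (pvSolve sg ps n j)) 1 : Nat)

-- ===== PORT B =====
-- first_exceed's while loop
def pvScan (ps : List Int) (t : Int) (e : Nat) (i : Nat) : Nat :=
  if i ≤ e ∧ ps.getD i 0 ≤ t then pvScan ps t e (i + 1) else i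
termination_by e + 1 - i
decreasing_by simp_wf; omega

def solution_alt (juice : List Int) (capacity : List Int) : Int :=
  let glasses := PySem.List.sorted2 (List.zip juice capacity) Prod.fst Prod.snd
  let n := glasses.length
  let ps := (glasses.foldl (fun acc g => (acc.1 ++ [acc.2 + g.1], acc.2 + g.1))
    (([] : List Int), (0 : Int))).1
  ((List.range n).foldl (fun best j =>
    let g := glasses.getD j (0, 0)
    max best (if ps.getD j 0 ≤ g.2 then pvScan ps g.2 (n - 1) j
              else pvScan ps (g.2 - g.1) (j - 1) 0 + 1)) 1 : Nat)

-- ===== PRECONDITION & SPEC =====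
-- Pre_ excludes exactly the inputs on which A raises: an empty juice list (IndexError),
-- a capacity list shorter than juice (IndexError), and inputs whose lexicographically
-- smallest (juice, capacity) glass holds more juice than its capacity (A's assert fails).
def Pre_solution (juice : List Int) (capacity : List Int) : Prop :=
  juice ≠ [] ∧ juice.length ≤ capacity.length ∧
  ((PySem.List.sorted2 (List.zip juice capacity) Prod.fst Prod.snd).getD 0 (0, 0)).1 ≤
    ((PySem.List.sorted2 (List.zip juice capacity) Prod.fst Prod.snd).getD 0 (0, 0)).2
instance (juice : List Int) (capacity : List Int) : Decidable (Pre_solution juice capacity) := by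
  unfold Pre_solution; infer_instance

def pvWitness_solution : List Int × List Int := ([1], [2])

def Spec_solution (juice : List Int) (capacity : List Int) (out : Int) : Prop := out = solution_alt juice capacity
instance (juice : List Int) (capacity : List Int) (out : Int) : Decidable (Spec_solution juice capacity out) := by unfold Spec_solution; infer_instance

-- ===== CLAIM (what is proved, stated in full; the proofs are below) =====
def Claim_equal_solution : Prop := ∀ (juice : List Int) (capacity : List Int), Dom_solution juice capacity → Pre_solution juice capacity → Spec_solution juice capacity (solution juice capacity)

-- ===== LEMMAS AND PROOFS =====

-- the prefix sums of the sorted glasses, as a specification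
def pvPS (sg : List (Int × Int)) : List Int :=
  (List.range sg.length).map (fun i => ((sg.take (i + 1)).map Prod.fst).sum)

theorem pvPS_length (sg : List (Int × Int)) : (pvPS sg).length = sg.length := by
  simp [pvPS]

theorem pvPS_getD (sg : List (Int × Int)) (k : Nat) (hk : k < sg.length) :
    (pvPS sg).getD k 0 = ((sg.take (k + 1)).map Prod.fst).sum := by
  rw [pvPS, List.getD_eq_getElem?_getD, List.getElem?_map, List.getElem?_range hk]
  simp

theorem pvPS_succ (sg : List (Int × Int)) (k : Nat) (hk : k + 1 < sg.length) :
    (pvPS sg).getD (k + 1) 0 = (pvPS sg).getD k 0 + (sg.getD (k + 1) (0, 0)).1 := by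
  rw [pvPS_getD sg k (by omega), pvPS_getD sg (k + 1) hk]
  have h : sg[k + 1]? = some sg[k + 1] := List.getElem?_eq_getElem hk
  rw [List.map_take, List.map_take, List.take_add_one, List.getElem?_map, h]
  simp [List.getD_eq_getElem?_getD, h]

theorem pvPS_zero (sg : List (Int × Int)) (h : 0 < sg.length) :
    (pvPS sg).getD 0 0 = (sg.getD 0 (0, 0)).1 := by
  rw [pvPS_getD sg 0 h]
  cases sg with
  | nil => simp at h
  | cons g l => simp

-- A's comprehension equals zip when capacity is long enough
theorem pv_zip_eq (ju ca : List Int) (h : ju.length ≤ ca.length) :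
    (List.range ju.length).map (fun i => (ju.getD i 0, ca.getD i 0)) = List.zip ju ca := by
  induction ju generalizing ca with
  | nil => simp
  | cons x xs ih =>
    cases ca with
    | nil => simp at h
    | cons y ys =>
      simp only [List.length_cons, List.range_succ_eq_map, List.map_cons, List.map_map]
      simp only [List.getD_cons_zero, List.zip_cons_cons]
      congr 1
      have hx := ih ys (by simpa using h)
      rw [← hx]
      apply List.map_congr_left
      intro i hi
      simp

-- insertion with a strict-weak-order comparator preserves sortedness
theorem pv_pairwise_insertBy {α : Type} (before : α → α → Bool)
    (hasym : ∀ a b, before a b = true → before b a = false)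
    (htrans : ∀ a b c, before b a = false → before c b = false → before c a = false)
    (x : α) (acc : List α) (hacc : acc.Pairwise (fun a b => before b a = false)) :
    (PySem.List.insertBy before x acc).Pairwise (fun a b => before b a = false) := by
  induction acc with
  | nil => simp [PySem.List.insertBy]
  | cons y ys ih =>
    rw [List.pairwise_cons] at hacc
    obtain ⟨hy, hys⟩ := hacc
    by_cases hb : before x y = true
    · rw [PySem.List.insertBy, if_pos hb]
      refine List.pairwise_cons.mpr ⟨?_, List.pairwise_cons.mpr ⟨hy, hys⟩⟩
      intro z hz
      rcases List.mem_cons.mp hz with rfl | hz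
      · exact hasym _ _ hb
      · exact htrans _ _ _ (hasym _ _ hb) (hy z hz)
    · rw [PySem.List.insertBy, if_neg hb]
      refine List.pairwise_cons.mpr ⟨?_, ih hys⟩
      intro z hz
      rcases (PySem.List.mem_insertBy _ _ _ _).mp hz with rfl | hz
      · exact Bool.eq_false_iff.mpr hb
      · exact hy z hz

theorem pv_pairwise_sorted2_aux {α : Type} (before : α → α → Bool)
    (hasym : ∀ a b, before a b = true → before b a = false)
    (htrans : ∀ a b c, before b a = false → before c b = false → before c a = false)
    (xs : List α) (acc : List α) (hacc : acc.Pairwise (fun a b => before b a = false)) :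
    (xs.foldl (fun acc x => PySem.List.insertBy before x acc) acc).Pairwise
      (fun a b => before b a = false) := by
  induction xs generalizing acc with
  | nil => exact hacc
  | cons x xs ih => exact ih _ (pv_pairwise_insertBy before hasym htrans x acc hacc)

-- sorted2 by (fst, snd) has nondecreasing first components
theorem pv_sorted2_fst_mono (xs : List (Int × Int)) :
    (PySem.List.sorted2 xs Prod.fst Prod.snd).Pairwise (fun a b => a.1 ≤ b.1) := by
  have h := pv_pairwise_sorted2_aux
    (fun a b : Int × Int => decide (a.1 < b.1) || (!decide (b.1 < a.1) && decide (a.2 < b.2)))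
    (by intro a b hab; simp at hab ⊢; omega)
    (by intro a b c h1 h2; simp at h1 h2 ⊢; omega)
    xs [] (by simp)
  rw [PySem.List.sorted2]
  simp only [if_neg (by decide : ¬ (false = true))]
  refine List.Pairwise.imp ?_ h
  intro a b hb
  simp at hb
  omega

-- B's running-total fold builds pvPS
theorem pv_psB_aux (l : List (Int × Int)) (acc : List Int) (t : Int) :
    (l.foldl (fun acc g => (acc.1 ++ [acc.2 + g.1], acc.2 + g.1)) (acc, t)).1 =
      acc ++ (List.range l.length).map (fun i => t + ((l.take (i + 1)).map Prod.fst).sum) := by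
  induction l generalizing acc t with
  | nil => simp
  | cons g l ih =>
    simp only [List.foldl_cons, ih]
    rw [List.append_assoc]
    congr 1
    simp only [List.length_cons, List.range_succ_eq_map, List.map_cons, List.map_map]
    simp only [List.singleton_append]
    refine List.cons_eq_cons.mpr ⟨by simp, ?_⟩
    apply List.map_congr_left
    intro i hi
    simp only [Function.comp_apply, Nat.succ_eq_add_one, List.take_succ_cons,
      List.map_cons, List.sum_cons]
    ring

theorem pv_psB (sg : List (Int × Int)) :
    (sg.foldl (fun acc g => (acc.1 ++ [acc.2 + g.1], acc.2 + g.1))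
      (([] : List Int), (0 : Int))).1 = pvPS sg := by
  rw [pv_psB_aux]
  simp [pvPS]

-- take (m+1) of pvPS extended by its next element
theorem pv_take_succ (sg : List (Int × Int)) (m : Nat) (hm : m < sg.length) :
    (pvPS sg).take m ++ [(pvPS sg).getD m 0] = (pvPS sg).take (m + 1) := by
  have hm' : m < (pvPS sg).length := by rw [pvPS_length]; exact hm
  rw [List.take_add_one, List.getElem?_eq_getElem hm', List.getD_eq_getElem?_getD,
    List.getElem?_eq_getElem hm']
  simp

-- A's set-loop builds pvPS: loop invariant
theorem pv_psA_inv (sg : List (Int × Int)) (n : Nat) (hn : n = sg.length) (h1 : 1 ≤ n)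
    (m : Nat) (hm : m ≤ n - 1) :
    (List.range m).foldl
      (fun l k => l.set (k + 1) (l.getD k 0 + (sg.getD (k + 1) (0, 0)).1))
      ((List.replicate n (0 : Int)).set 0 ((sg.getD 0 (0, 0)).1)) =
    (pvPS sg).take (m + 1) ++ List.replicate (n - m - 1) 0 := by
  induction m with
  | zero =>
    simp only [List.range_zero, List.foldl_nil]
    obtain ⟨v, l, rfl⟩ : ∃ v l, sg = v :: l := by
      cases sg with
      | nil => simp at hn; omega
      | cons v l => exact ⟨v, l, rfl⟩
    obtain ⟨n', rfl⟩ : ∃ n', n = n' + 1 := ⟨n - 1, by omega⟩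
    have h0 : 0 < (v :: l).length := by simp
    rw [List.replicate_succ, List.set_cons_zero]
    rw [show (pvPS (v :: l)).take (0 + 1) = [(pvPS (v :: l)).getD 0 0] from ?_]
    · rw [pvPS_zero _ h0]; simp
    · have h := pv_take_succ (v :: l) 0 h0
      simpa using h.symm
  | succ m ih =>
    rw [List.range_succ, List.foldl_append, List.foldl_cons, List.foldl_nil,
      ih (by omega)]
    have hmn : m + 1 < n := by omega
    have hlen : ((pvPS sg).take (m + 1)).length = m + 1 := by
      rw [List.length_take, pvPS_length]; omega
    have hget : (((pvPS sg).take (m + 1) ++ List.replicate (n - m - 1) 0).getD m 0) =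
        (pvPS sg).getD m 0 := by
      rw [List.getD_eq_getElem?_getD, List.getElem?_append_left (by omega),
        List.getElem?_take_of_lt (by omega), ← List.getD_eq_getElem?_getD]
    have hrep : List.replicate (n - m - 1) (0 : Int) = 0 :: List.replicate (n - m - 2) 0 := by
      rw [show n - m - 1 = (n - m - 2) + 1 by omega, List.replicate_succ]
    rw [hget, hrep, List.set_append_right _ _ (by omega), hlen]
    simp only [show m + 1 - (m + 1) = 0 from by omega, List.set_cons_zero]
    rw [show (pvPS sg).getD m 0 + (sg.getD (m + 1) (0, 0)).1 = (pvPS sg).getD (m + 1) 0 from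
      (pvPS_succ sg m (by omega)).symm]
    rw [show ((pvPS sg).getD (m + 1) 0 :: List.replicate (n - m - 2) (0 : Int)) =
      [(pvPS sg).getD (m + 1) 0] ++ List.replicate (n - m - 2) 0 from rfl,
      ← List.append_assoc, pv_take_succ sg (m + 1) (by omega),
      show n - m - 2 = n - (m + 1) - 1 from by omega]

theorem pv_psA (sg : List (Int × Int)) (n : Nat) (hn : n = sg.length) (h1 : 1 ≤ n) :
    (List.range (n - 1)).foldl
      (fun l k => l.set (k + 1) (l.getD k 0 + (sg.getD (k + 1) (0, 0)).1))
      ((List.replicate n (0 : Int)).set 0 ((sg.getD 0 (0, 0)).1)) = pvPS sg := by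
  rw [pv_psA_inv sg n hn h1 (n - 1) le_rfl]
  rw [show n - 1 + 1 = n by omega, show n - (n - 1) - 1 = 0 by omega]
  simp [List.take_of_length_le, pvPS_length, hn.ge]

-- sorted fst components: getD version
theorem pv_fst_mono_getD (sg : List (Int × Int)) (hmono : sg.Pairwise (fun a b => a.1 ≤ b.1))
    (i j : Nat) (hij : i ≤ j) (hj : j < sg.length) :
    (sg.getD i (0, 0)).1 ≤ (sg.getD j (0, 0)).1 := by
  rcases Nat.eq_or_lt_of_le hij with rfl | hlt
  · exact le_rfl
  · have hi : i < sg.length := by omega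
    rw [List.getD_eq_getElem?_getD, List.getD_eq_getElem?_getD,
      List.getElem?_eq_getElem hi, List.getElem?_eq_getElem hj]
    exact (List.pairwise_iff_getElem.mp hmono) i j hi hj hlt

-- after a crossing, every later prefix sum stays above the target
theorem pv_cross_up (sg : List (Int × Int)) (hmono : sg.Pairwise (fun a b => a.1 ≤ b.1))
    (t : Int) (i k : Nat) (h1 : 1 ≤ i) (hik : i ≤ k) (hk : k < sg.length)
    (hlo : (pvPS sg).getD (i - 1) 0 ≤ t) (hhi : t < (pvPS sg).getD i 0) :
    t < (pvPS sg).getD k 0 := by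
  induction k with
  | zero => omega
  | succ k ih =>
    rcases Nat.eq_or_lt_of_le hik with heq | hlt
    · rw [← heq]; exact hhi
    · have hk' : k < sg.length := by omega
      have hprev : t < (pvPS sg).getD k 0 := ih (by omega) (by omega)
      have hstep : (sg.getD i (0, 0)).1 ≤ (sg.getD (k + 1) (0, 0)).1 :=
        pv_fst_mono_getD sg hmono i (k + 1) (by omega) hk
      have hdi : (pvPS sg).getD i 0 = (pvPS sg).getD (i - 1) 0 + (sg.getD i (0, 0)).1 := by
        have h := pvPS_succ sg (i - 1) (by omega)
        rwa [show i - 1 + 1 = i from by omega] at h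
      rw [pvPS_succ sg k hk]
      omega

-- on [s, e] the prefix sums are either all ≤ t, or there is a first crossing
theorem pv_dichotomy (sg : List (Int × Int)) (t : Int) (s e : Nat)
    (hse : s ≤ e) (he : e < sg.length) (hs : (pvPS sg).getD s 0 ≤ t) :
    (∀ k, s ≤ k → k ≤ e → (pvPS sg).getD k 0 ≤ t) ∨
    (∃ i, s < i ∧ i ≤ e ∧ (∀ k, s ≤ k → k < i → (pvPS sg).getD k 0 ≤ t) ∧
      t < (pvPS sg).getD i 0) := by
  induction e with
  | zero =>
    left
    intro k hk1 hk2
    have hks : k = s := by omega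
    rw [hks]; exact hs
  | succ e ih =>
    rcases Nat.eq_or_lt_of_le hse with heq | hlt
    · left
      intro k hk1 hk2
      have hks : k = s := by omega
      rw [hks]; exact hs
    · rcases ih (by omega) (by omega) with hall | ⟨i, hi1, hi2, hi3, hi4⟩
      · by_cases hnew : (pvPS sg).getD (e + 1) 0 ≤ t
        · left
          intro k hk1 hk2
          rcases Nat.lt_or_ge k (e + 1) with h | h
          · exact hall k hk1 (by omega)
          · have hke : k = e + 1 := by omega
            rw [hke]; exact hnew
        · right
          exact ⟨e + 1, by omega, le_rfl,
            fun k hk1 hk2 => hall k hk1 (by omega), by omega⟩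
      · right
        exact ⟨i, hi1, by omega, hi3, hi4⟩

theorem pvScan_all (ps : List Int) (t : Int) (e s : Nat) (hs : s ≤ e + 1)
    (hall : ∀ k, s ≤ k → k ≤ e → ps.getD k 0 ≤ t) : pvScan ps t e s = e + 1 := by
  have H : ∀ d s, e + 1 - s = d → s ≤ e + 1 →
      (∀ k, s ≤ k → k ≤ e → ps.getD k 0 ≤ t) → pvScan ps t e s = e + 1 := by
    intro d
    induction d with
    | zero =>
      intro s hd hse _
      rw [pvScan, if_neg (by omega)]
      omega
    | succ d ih =>
      intro s hd hse hall
      have hse' : s ≤ e := by omega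
      rw [pvScan, if_pos ⟨hse', hall s le_rfl hse'⟩]
      exact ih (s + 1) (by omega) (by omega) (fun k hk1 hk2 => hall k (by omega) hk2)
  exact H (e + 1 - s) s rfl hs hall

theorem pvScan_first (ps : List Int) (t : Int) (e s i : Nat) (hsi : s ≤ i) (hie : i ≤ e)
    (hbelow : ∀ k, s ≤ k → k < i → ps.getD k 0 ≤ t) (hi : t < ps.getD i 0) :
    pvScan ps t e s = i := by
  have H : ∀ d s, i - s = d → s ≤ i →
      (∀ k, s ≤ k → k < i → ps.getD k 0 ≤ t) → pvScan ps t e s = i := by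
    intro d
    induction d with
    | zero =>
      intro s hd hsi' _
      have hs : s = i := by omega
      subst hs
      rw [pvScan, if_neg (by intro ⟨_, h⟩; omega)]
    | succ d ih =>
      intro s hd hsi' hbelow
      have hslt : s < i := by omega
      rw [pvScan, if_pos ⟨by omega, hbelow s le_rfl hslt⟩]
      exact ih (s + 1) (by omega) (by omega) (fun k hk1 hk2 => hbelow k (by omega) hk2)
  exact H (i - s) s rfl hsi hbelow

-- the binary search lands on the (unique) crossing
theorem pvFindLoop_eq (sg : List (Int × Int)) (hmono : sg.Pairwise (fun a b => a.1 ≤ b.1))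
    (t : Int) (i : Nat) (s e : Nat) (hse : s < e) (he : e < sg.length)
    (hbelow : ∀ k, s ≤ k → k < i → (pvPS sg).getD k 0 ≤ t)
    (hi : t < (pvPS sg).getD i 0) (hsi : s < i) (hie : i ≤ e) :
    pvFindLoop (pvPS sg) t s e = i := by
  have H : ∀ d s e, e - s = d → s < e → e < sg.length →
      (∀ k, s ≤ k → k < i → (pvPS sg).getD k 0 ≤ t) → s < i → i ≤ e →
      pvFindLoop (pvPS sg) t s e = i := by
    intro d
    induction d using Nat.strong_induction_on with
    | _ d ih =>
      intro s e hd hse' he' hbelow' hsi' hie'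
      by_cases h1 : e - s = 1
      · rw [pvFindLoop, if_pos h1]
        omega
      · have hse2 : s + 1 < e := by omega
        rw [pvFindLoop, if_neg h1, dif_pos hse2]
        set mid := s + (e - s) / 2 with hmid
        have hmids : s < mid := by omega
        have hmide : mid < e := by omega
        by_cases hc : (pvPS sg).getD mid 0 ≤ t
        · have himid : mid < i := by
            by_contra hcon
            push Not at hcon
            have h := pv_cross_up sg hmono t i mid (by omega) (by omega) (by omega)
              (hbelow' (i - 1) (by omega) (by omega)) hi
            omega
          rw [if_pos hc]
          exact ih (e - mid) (by omega) mid e rfl hmide he'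
            (fun k hk1 hk2 => hbelow' k (by omega) hk2) himid hie'
        · have himid : i ≤ mid := by
            by_contra hcon
            push Not at hcon
            exact hc (hbelow' mid (by omega) hcon)
          rw [if_neg hc]
          exact ih (mid - s) (by omega) s mid rfl hmids (by omega) hbelow' hsi' himid
  exact H (e - s) s e rfl hse he hbelow hsi hie

-- the binary search agrees with the linear scan on the sorted prefix sums
theorem pvFind_eq_scan (sg : List (Int × Int)) (hmono : sg.Pairwise (fun a b => a.1 ≤ b.1))
    (t : Int) (s e : Nat) (hse : s ≤ e) (he : e < sg.length) :
    pvFind (pvPS sg) s e t = pvScan (pvPS sg) t e s := by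
  by_cases h0 : (pvPS sg).getD s 0 > t
  · rw [pvFind, if_pos h0, pvScan, if_neg (by intro ⟨_, h⟩; omega)]
  · push Not at h0
    rcases pv_dichotomy sg t s e hse he h0 with hall | ⟨i, hi1, hi2, hi3, hi4⟩
    · rw [pvFind, if_neg (by omega), if_pos (hall e hse le_rfl)]
      exact (pvScan_all _ t e s (by omega) hall).symm
    · have hPe : t < (pvPS sg).getD e 0 :=
        pv_cross_up sg hmono t i e (by omega) hi2 he (hi3 (i - 1) (by omega) (by omega)) hi4
      rw [pvFind, if_neg (by omega), if_neg (by omega),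
        pvScan_first _ t e s i (by omega) hi2 hi3 hi4]
      exact pvFindLoop_eq sg hmono t i s e (by omega) he hi3 hi4 hi1 hi2

-- ===== VERDICT (by name: the statement is the Claim_ definition above) =====
theorem solution_spec : Claim_equal_solution := by
  intro juice capacity _hdom hpre
  obtain ⟨hne, hlen, hfit⟩ := hpre
  unfold Spec_solution solution solution_alt
  have hzip : (List.range juice.length).map (fun i => (juice.getD i 0, capacity.getD i 0)) =
      List.zip juice capacity := pv_zip_eq juice capacity hlen
  set sg := PySem.List.sorted2 (List.zip juice capacity) Prod.fst Prod.snd with hsg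
  have hmono : sg.Pairwise (fun a b => a.1 ≤ b.1) :=
    pv_sorted2_fst_mono (List.zip juice capacity)
  have hlensg : sg.length = juice.length := by
    rw [hsg, (PySem.List.sorted2_perm (List.zip juice capacity) Prod.fst Prod.snd false).length_eq,
      List.length_zip]
    omega
  have hn1 : 1 ≤ juice.length := by
    cases juice with
    | nil => exact absurd rfl hne
    | cons x xs => simp
  simp only [hzip, ← hsg]
  rw [pv_psB sg, pv_psA sg juice.length hlensg.symm hn1]
  rw [hlensg]
  congr 1
  apply PySem.List.foldl_congr_mem
  intro acc j hj
  have hjn : j < juice.length := List.mem_range.mp hj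
  congr 1
  rw [pvSolve]
  split_ifs with hc
  · exact pvFind_eq_scan sg hmono _ j (juice.length - 1) (by omega) (by omega)
  · have hj1 : 1 ≤ j := by
      by_contra hj0
      push Not at hj0
      have hj0' : j = 0 := by omega
      rw [hj0', pvPS_zero sg (by omega)] at hc
      exact hc (hsg ▸ hfit)
    rw [pvFind_eq_scan sg hmono _ 0 (j - 1) (by omega) (by omega)]
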